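-- pv_equiv track=rewrite | github.com/simuzin/Online_Judge | 프로그래머스/1/64061. 크레인 인형뽑기 게임/크레인 인형뽑기 게임.py | solution
-- ===== SOURCE A (Python) =====
-- def solution(board, moves):
--     answer = 0
--     temp, stack = [], []
--     for j in range(len(board[0])):
--         temp.append([])
--         for i in range(len(board)):
--             if board[i][j] != 0:
--                 temp[-1].append(board[i][j])
--     for i in moves:
--         if temp[i-1]:
--             stack.append(temp[i-1].pop(0))
--             if (len(stack) >= 2) and (stack[-2] == stack[-1]):
--                 stack.pop()
--                 stack.pop()
--                 answer += 2
--     return answer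
-- ===== SOURCE B (Python) =====
-- def solution(board, moves):
--     n = len(board)
--     ptrs = [0] * len(board[0])
--     stack = []
--     answer = 0
--     for m in moves:
--         col = m - 1
--         r = ptrs[col]
--         while r < n and board[r][col] == 0:
--             r += 1
--         if r < n:
--             doll = board[r][col]
--             ptrs[col] = r + 1
--             if stack and stack[-1] == doll:
--                 stack.pop()
--                 answer += 2
--             else:
--                 stack.append(doll)
--     return answer
-- ===== Notes on version B (the rewrite author's own statement) =====
-- stated objective: simpler
-- what changed: B drops A's up-front construction of per-column compressed lists (mutated by pop(0)) and instead keeps one row pointer per column, advanced lazily past zero cells while reading the board in place.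
-- outside the precondition, e.g. on solution([[1, 2], [1, 2, 9]], [0, 0]): A returns 2, B returns 0
import Mathlib
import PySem

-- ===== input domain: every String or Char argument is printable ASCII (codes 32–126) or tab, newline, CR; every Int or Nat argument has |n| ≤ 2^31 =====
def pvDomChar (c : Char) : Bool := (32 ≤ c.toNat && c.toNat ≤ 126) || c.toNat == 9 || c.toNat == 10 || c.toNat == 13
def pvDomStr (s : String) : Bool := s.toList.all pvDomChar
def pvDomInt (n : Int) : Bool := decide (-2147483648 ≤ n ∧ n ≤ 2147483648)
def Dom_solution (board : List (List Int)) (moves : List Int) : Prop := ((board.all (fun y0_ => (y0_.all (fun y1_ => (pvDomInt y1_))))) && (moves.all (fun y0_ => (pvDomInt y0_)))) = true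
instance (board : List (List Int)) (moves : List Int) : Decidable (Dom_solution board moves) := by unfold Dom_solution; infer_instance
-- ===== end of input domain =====

-- B replaces A's precomputed per-column compressed lists by lazily-advanced per-column row
-- pointers reading the board in place (objective: simpler; board is never mutated by either).


-- list assignment l[i] = v at a Python index; exact for in-range i (both ports only apply it
-- at an index at which a pyGet? just succeeded)
def pySetAt {α : Type} (l : List α) (i : Int) (v : α) : List α :=
  if 0 ≤ i then l.set i.toNat v else l.set (i + l.length).toNat v

-- ===== PORT A =====
-- stack is represented head-as-top; this is A's append / compare-last-two / pop-pop step
def pushA (doll : Int) (stack : List Int) (answer : Int) : List Int × Int :=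
  match doll :: stack with
  | a :: b :: rest => if b = a then (rest, answer + 2) else (a :: b :: rest, answer)
  | s => (s, answer)

def stepA (st : List (List Int) × List Int × Int) (i : Int) : List (List Int) × List Int × Int :=
  match PySem.List.pyGet? st.1 (i - 1) with   -- temp[i-1]
  | none => st                                -- IndexError; Pre_ excludes
  | some col =>
    if col ≠ [] then
      let doll := col.headD 0                 -- temp[i-1].pop(0)
      let temp' := pySetAt st.1 (i - 1) col.tail
      let p := pushA doll st.2.1 st.2.2
      (temp', p.1, p.2)
    else st

def solution (board : List (List Int)) (moves : List Int) : Int :=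
  -- len(board[0]): Python raises on an empty board; a row shorter than board[0] raises too
  -- inside the building loop (both excluded by Pre_)
  let temp := (List.range (board.headD []).length).map (fun j =>
      board.foldl (fun col row => if row.getD j 0 ≠ 0 then col ++ [row.getD j 0] else col) [])
  (moves.foldl stepA (temp, [], 0)).2.2

-- ===== PORT B =====
-- the `while r < n and board[r][col] == 0: r += 1` loop of Source B
def bAdvance (board : List (List Int)) (col : Int) (r : Nat) : Nat :=
  if _ : r < board.length then
    match PySem.List.pyGet? (board.getD r []) col with   -- board[r][col]
    | some v => if v = 0 then bAdvance board col (r + 1) else r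
    | none => r                               -- IndexError in Python; unreachable under Pre_
  else r
  termination_by board.length - r
  decreasing_by omega

def pushB (doll : Int) (stack : List Int) (answer : Int) : List Int × Int :=
  match stack with
  | b :: rest => if b = doll then (rest, answer + 2) else (doll :: b :: rest, answer)
  | [] => ([doll], answer)

def stepB (board : List (List Int)) (st : List Nat × List Int × Int) (m : Int) : List Nat × List Int × Int :=
  match PySem.List.pyGet? st.1 (m - 1) with   -- ptrs[col]
  | none => st                                -- IndexError; Pre_ excludes
  | some r0 =>
    let r := bAdvance board (m - 1) r0
    if r < board.length then
      let doll := (PySem.List.pyGet? (board.getD r []) (m - 1)).getD 0   -- board[r][col]; in range under Pre_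
      let p := pushB doll st.2.1 st.2.2
      (pySetAt st.1 (m - 1) (r + 1), p.1, p.2)
    else st

def solution_alt (board : List (List Int)) (moves : List Int) : Int :=
  (moves.foldl (stepB board) (List.replicate (board.headD []).length 0, [], 0)).2.2

-- ===== PRECONDITION & SPEC =====
-- Pre_ excludes inputs where A raises IndexError (empty board, a row shorter than board[0],
-- a move m with m-1 outside [-ncols, ncols)) and, on boards having a row LONGER than board[0],
-- nonpositive moves: there A's value comes from Python's accidental negative-index wraparound
-- into the compressed column list while B wraps into the longer raw row.
def Pre_solution (board : List (List Int)) (moves : List Int) : Prop :=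
  board ≠ [] ∧
  (∀ row ∈ board, (board.headD []).length ≤ row.length) ∧
  (∀ m ∈ moves, 1 - ((board.headD []).length : Int) ≤ m ∧ m ≤ ((board.headD []).length : Int)) ∧
  ((∀ row ∈ board, row.length = (board.headD []).length) ∨ (∀ m ∈ moves, 1 ≤ m))
instance (board : List (List Int)) (moves : List Int) : Decidable (Pre_solution board moves) := by unfold Pre_solution; infer_instance
def pvWitness_solution : List (List Int) × List Int := ([[1, 0], [2, 1]], [1, 2, 1])

def Spec_solution (board : List (List Int)) (moves : List Int) (out : Int) : Prop := out = solution_alt board moves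
instance (board : List (List Int)) (moves : List Int) (out : Int) : Decidable (Spec_solution board moves out) := by unfold Spec_solution; infer_instance

-- ===== CLAIM (what is proved, stated in full; the proofs are below) =====
def Claim_equal_solution : Prop := ∀ (board : List (List Int)) (moves : List Int), Dom_solution board moves → Pre_solution board moves → Spec_solution board moves (solution board moves)

-- ===== LEMMAS AND PROOFS =====
-- the still-uncollected nonzero cells of column c from row r downward
def nzFrom (board : List (List Int)) (c : Nat) (r : Nat) : List Int :=
  ((board.drop r).map (fun row => row.getD c 0)).filter (fun v => v ≠ 0)

theorem pyGet_norm {α : Type} (l : List α) (i : Int) (c : Nat) (hc : c < l.length)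
    (h : i = (c : Int) ∨ i + l.length = (c : Int)) :
    PySem.List.pyGet? l i = some (l[c]'hc) := by
  unfold PySem.List.pyGet? PySem.List.pyIdx?
  rcases h with h | h
  · subst h; simp [hc]
  · have hneg : ¬ (0 : Int) ≤ i := by omega
    have hge : -(l.length : Int) ≤ i := by omega
    have hk : l.length - (-i).toNat = c := by omega
    simp only [if_neg hneg, if_pos hge, hk, Option.bind_some]
    simp [hc]

theorem pySetAt_norm {α : Type} (l : List α) (i : Int) (c : Nat) (v : α) (hc : c < l.length)
    (h : i = (c : Int) ∨ i + l.length = (c : Int)) :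
    pySetAt l i v = l.set c v := by
  unfold pySetAt
  rcases h with h | h
  · rw [if_pos (by omega)]; congr 1; omega
  · rw [if_neg (by omega)]; congr 1; omega

theorem build_eq (c : Nat) : ∀ (l : List (List Int)) (acc : List Int),
    l.foldl (fun col row => if row.getD c 0 ≠ 0 then col ++ [row.getD c 0] else col) acc
      = acc ++ nzFrom l c 0 := by
  intro l
  induction l with
  | nil => intro acc; simp [nzFrom]
  | cons row t ih =>
      intro acc
      rw [List.foldl_cons, ih]
      by_cases h : row[c]?.getD 0 = 0 <;>
        simp [nzFrom, List.getD_eq_getElem?_getD, h]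

theorem nz_adv_aux (board : List (List Int)) (colInt : Int) (c : Nat)
    (hrow : ∀ r, r < board.length →
      PySem.List.pyGet? (board.getD r []) colInt = some ((board.getD r []).getD c 0)) :
    ∀ (k r : Nat), board.length ≤ r + k →
    nzFrom board c r = if _ : bAdvance board colInt r < board.length
      then (board.getD (bAdvance board colInt r) []).getD c 0 :: nzFrom board c (bAdvance board colInt r + 1)
      else [] := by
  intro k
  induction k with
  | zero =>
      intro r hr
      have h1 : ¬ r < board.length := by omega
      rw [bAdvance]
      simp [h1, nzFrom, List.drop_eq_nil_of_le (by omega : board.length ≤ r)]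
  | succ k ih =>
      intro r hr
      by_cases h1 : r < board.length
      · have hdrop : board.drop r = board[r] :: board.drop (r + 1) :=
          List.drop_eq_getElem_cons h1
        have hgd : board.getD r [] = board[r] := List.getD_eq_getElem board [] h1
        have hnz : nzFrom board c r
            = if (board[r]'h1).getD c 0 = 0 then nzFrom board c (r + 1)
              else (board[r]'h1).getD c 0 :: nzFrom board c (r + 1) := by
          simp only [nzFrom, hdrop, List.map_cons, List.filter_cons]
          by_cases h0 : (board[r]'h1).getD c 0 = 0 <;> simp [List.getD_eq_getElem?_getD, h0]
        by_cases h0 : (board[r]'h1).getD c 0 = 0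
        · have h0' : (board[r]'h1)[c]?.getD 0 = 0 := by
            simpa [List.getD_eq_getElem?_getD] using h0
          have hstep : bAdvance board colInt r = bAdvance board colInt (r + 1) := by
            rw [bAdvance, dif_pos h1, hrow r h1, hgd]
            simp [List.getD_eq_getElem?_getD, h0']
          rw [hstep, hnz, if_pos h0]
          exact ih (r + 1) (by omega)
        · have h0' : ¬ (board[r]'h1)[c]?.getD 0 = 0 := by
            simpa [List.getD_eq_getElem?_getD] using h0
          have hstop : bAdvance board colInt r = r := by
            rw [bAdvance, dif_pos h1, hrow r h1, hgd]
            simp [List.getD_eq_getElem?_getD, h0']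
          rw [hstop, hnz, if_neg h0, dif_pos h1, hgd]
      · rw [bAdvance]
        simp [h1, nzFrom, List.drop_eq_nil_of_le (by omega : board.length ≤ r)]

theorem pushAB (doll : Int) (stack : List Int) (answer : Int) :
    pushA doll stack answer = pushB doll stack answer := by
  cases stack <;> simp [pushA, pushB]

theorem fold_eq (board : List (List Int)) :
    ∀ (moves : List Int) (ptrs : List Nat) (stack : List Int) (ans : Int),
    (∀ row ∈ board, (board.headD []).length ≤ row.length) →
    (∀ m ∈ moves, 1 - ((board.headD []).length : Int) ≤ m ∧ m ≤ ((board.headD []).length : Int)) →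
    ((∀ row ∈ board, row.length = (board.headD []).length) ∨ (∀ m ∈ moves, 1 ≤ m)) →
    ptrs.length = (board.headD []).length →
    (moves.foldl stepA
        ((List.range (board.headD []).length).map (fun j => nzFrom board j (ptrs.getD j 0)),
         stack, ans)).2.2
      = (moves.foldl (stepB board) (ptrs, stack, ans)).2.2 := by
  intro moves
  induction moves with
  | nil => intro ptrs stack ans _ _ _ _; rfl
  | cons m ms ih =>
      intro ptrs stack ans hrows hmv hcase hlen
      have hm := hmv m (List.mem_cons_self ..)
      have hms : ∀ m' ∈ ms, 1 - ((board.headD []).length : Int) ≤ m' ∧ m' ≤ ((board.headD []).length : Int) :=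
        fun m' h => hmv m' (List.mem_cons_of_mem _ h)
      have hcase' : (∀ row ∈ board, row.length = (board.headD []).length) ∨ (∀ m' ∈ ms, 1 ≤ m') :=
        hcase.imp id (fun h m' hm' => h m' (List.mem_cons_of_mem _ hm'))
      set N := (board.headD []).length with hN
      set c : Nat := if 0 ≤ m - 1 then (m - 1).toNat else (m - 1 + N).toNat with hcdef
      have hc : c < N := by rw [hcdef]; split <;> omega
      have hi : ∀ (L : Nat), L = N → (m - 1 = (c : Int) ∨ m - 1 + L = (c : Int)) := by
        intro L hL
        rw [hcdef, hL]
        by_cases h0 : 0 ≤ m - 1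
        · left; rw [if_pos h0]; omega
        · right; rw [if_neg h0]; omega
      set r := ptrs.getD c 0 with hrdef
      set r' := bAdvance board (m - 1) r with hr'def
      -- every row access board[?][m-1] of B resolves to the canonical column c
      have hrow : ∀ rr, rr < board.length →
          PySem.List.pyGet? (board.getD rr []) (m - 1) = some ((board.getD rr []).getD c 0) := by
        intro rr hrr
        have hmem : board.getD rr [] ∈ board := by
          rw [List.getD_eq_getElem board [] hrr]; exact List.getElem_mem _
        have hclen : c < (board.getD rr []).length := lt_of_lt_of_le hc (hrows _ hmem)
        rw [List.getD_eq_getElem _ _ hclen]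
        apply pyGet_norm
        by_cases h0 : 0 ≤ m - 1
        · left; rw [hcdef, if_pos h0]; omega
        · have hrect : (board.getD rr []).length = N := by
            rcases hcase with hrect | hpos
            · exact hrect _ hmem
            · exact absurd (hpos m (List.mem_cons_self ..)) (by omega)
          right; rw [hrect]; exact (hi N rfl).resolve_left (by omega)
      -- A's temp[m-1]
      have hgetT : PySem.List.pyGet?
            ((List.range N).map (fun j => nzFrom board j (ptrs.getD j 0))) (m - 1)
          = some (nzFrom board c r) := by
        have hcl : c < ((List.range N).map (fun j => nzFrom board j (ptrs.getD j 0))).length := by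
          simpa using hc
        rw [pyGet_norm _ _ c hcl (hi _ (by simp))]
        simp [hrdef]
      -- B's ptrs[m-1]
      have hgetP : PySem.List.pyGet? ptrs (m - 1) = some r := by
        have hcl : c < ptrs.length := by omega
        rw [pyGet_norm _ _ c hcl (hi _ hlen)]
        rw [hrdef, List.getD_eq_getElem _ _ hcl]
      simp only [List.foldl_cons]
      have hnz := nz_adv_aux board (m - 1) c hrow board.length r (by omega)
      by_cases hlt : r' < board.length
      · rw [← hr'def] at hnz
        rw [dif_pos hlt] at hnz
        have hA : stepA ((List.range N).map (fun j => nzFrom board j (ptrs.getD j 0)), stack, ans) m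
            = (((List.range N).map (fun j => nzFrom board j (ptrs.getD j 0))).set c
                 (nzFrom board c (r' + 1)),
               (pushA ((board.getD r' []).getD c 0) stack ans).1,
               (pushA ((board.getD r' []).getD c 0) stack ans).2) := by
          simp only [stepA, hgetT, hnz, ne_eq, List.cons_ne_nil, not_false_eq_true, if_pos,
            List.headD_cons, List.tail_cons]
          rw [pySetAt_norm _ _ c _ (by simpa using hc) (hi _ (by simp))]
        have hB : stepB board (ptrs, stack, ans) m
            = (ptrs.set c (r' + 1),
               (pushB ((board.getD r' []).getD c 0) stack ans).1,
               (pushB ((board.getD r' []).getD c 0) stack ans).2) := by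
          simp only [stepB, hgetP, ← hr'def, if_pos hlt, hrow r' hlt, Option.getD_some]
          rw [pySetAt_norm _ _ c _ (by omega) (hi _ hlen)]
        rw [hA, hB, pushAB]
        have hset : (((List.range N).map (fun j => nzFrom board j (ptrs.getD j 0))).set c
              (nzFrom board c (r' + 1)))
            = (List.range N).map (fun j => nzFrom board j ((ptrs.set c (r' + 1)).getD j 0)) := by
          apply List.ext_getElem
          · simp
          · intro i h1 h2
            simp only [List.getElem_set, List.getElem_map, List.getElem_range]
            have hi2 : i < N := by simpa using h2
            by_cases hic : c = i
            · subst hic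
              have hcl : c < ptrs.length := by omega
              simp [hcl]
            · rw [if_neg hic]
              by_cases hip : i < ptrs.length
              · rw [List.getD_eq_getElem _ _ hip,
                    List.getD_eq_getElem _ _ (by simpa using hip)]
                congr 1
                simp [hic]
              · rw [List.getD_eq_default _ _ (by omega),
                    List.getD_eq_default _ _ (by rw [List.length_set]; omega)]
        rw [hset]
        exact ih (ptrs.set c (r' + 1)) _ _ hrows hms hcase' (by rw [List.length_set]; exact hlen)
      · rw [← hr'def, dif_neg hlt] at hnz
        have hA : stepA ((List.range N).map (fun j => nzFrom board j (ptrs.getD j 0)), stack, ans) m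
            = ((List.range N).map (fun j => nzFrom board j (ptrs.getD j 0)), stack, ans) := by
          simp only [stepA]
          rw [hgetT, hnz]
          simp
        have hB : stepB board (ptrs, stack, ans) m = (ptrs, stack, ans) := by
          simp [stepB, hgetP, ← hr'def, hlt]
        rw [hA, hB]
        exact ih ptrs stack ans hrows hms hcase' hlen

-- ===== VERDICT (by name: the statement is the Claim_ definition above) =====
theorem solution_spec : Claim_equal_solution := by
  intro board moves _ hpre
  unfold Spec_solution
  simp only [solution, solution_alt]
  have hrep : ∀ j, (List.replicate (board.headD []).length (0 : Nat)).getD j 0 = 0 := by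
    intro j
    by_cases h : j < (board.headD []).length
    · rw [List.getD_eq_getElem _ _ (by simpa using h)]; simp
    · rw [List.getD_eq_default _ _ (by simpa using not_lt.mp h)]
  have hb : (List.range (board.headD []).length).map (fun j =>
        board.foldl (fun col row => if row.getD j 0 ≠ 0 then col ++ [row.getD j 0] else col) [])
      = (List.range (board.headD []).length).map (fun j =>
          nzFrom board j ((List.replicate (board.headD []).length 0).getD j 0)) := by
    apply List.map_congr_left
    intro j _
    rw [build_eq, hrep]
    simp
  rw [hb]
  exact fold_eq board moves _ [] 0 hpre.2.1 hpre.2.2.1 hpre.2.2.2 (by simp)
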